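-- pv_equiv track=rewrite | github.com/constarik/Noisore | noisore_sim.py | pick_greedy
-- ===== SOURCE A (Python) =====
-- def pick_greedy(grid, drop_power, rows, cols):
--     best, best_blockers = 0, float('inf')
--     for c in range(cols):
--         b = sum(1 for r in range(rows) if grid[r][c] > 0)
--         if b < best_blockers:
--             best_blockers = b
--             best = c
--     return best
-- ===== SOURCE B (Python) =====
-- def pick_greedy(grid, drop_power, rows, cols):
--     if cols <= 0:
--         return 0
--     # pass 1: build the full per-column blocker table in row-major order
--     counts = [0] * cols
--     for r in range(rows):
--         row = grid[r]
--         for c in range(cols):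
--             if row[c] > 0:
--                 counts[c] += 1
--     # pass 2: first-minimum selection over the table
--     best, best_b = 0, counts[0]
--     for c in range(1, cols):
--         if counts[c] < best_b:
--             best, best_b = c, counts[c]
--     return best
-- ===== Notes on version B (the rewrite author's own statement) =====
-- stated objective: alternative
-- what changed: B replaces A's column-by-column scan with a scalar running minimum by a row-major single pass that builds the whole per-column blocker table first, followed by a separate first-minimum selection pass over the table (no float('inf') sentinel).
import Mathlib
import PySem

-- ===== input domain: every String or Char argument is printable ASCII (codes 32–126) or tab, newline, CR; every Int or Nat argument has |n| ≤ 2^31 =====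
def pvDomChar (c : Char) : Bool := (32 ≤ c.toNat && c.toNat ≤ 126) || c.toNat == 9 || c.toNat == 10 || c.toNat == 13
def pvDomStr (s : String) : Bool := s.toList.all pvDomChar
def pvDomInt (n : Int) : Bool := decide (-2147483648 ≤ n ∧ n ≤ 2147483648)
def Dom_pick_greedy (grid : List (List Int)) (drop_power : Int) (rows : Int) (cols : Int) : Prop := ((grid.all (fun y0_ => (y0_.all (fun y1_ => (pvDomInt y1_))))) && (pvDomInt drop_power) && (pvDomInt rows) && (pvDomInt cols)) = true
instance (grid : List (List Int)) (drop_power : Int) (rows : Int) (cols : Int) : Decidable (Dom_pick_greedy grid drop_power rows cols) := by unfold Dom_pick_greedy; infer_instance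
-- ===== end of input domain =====

-- B builds the full per-column blocker table in one row-major pass and then selects the
-- first minimum in a separate pass, instead of A's column-by-column scan with a scalar
-- running minimum and a float('inf') sentinel. Same cost; alternative decomposition.

-- ===== PORT A =====
-- b = sum(1 for r in range(rows) if grid[r][c] > 0); out-of-range access raises in Python (excluded by Pre_)
def pickA_col (grid : List (List Int)) (rows : Int) (c : Int) : Int :=
  (PySem.List.pyRange 0 rows 1).foldl
    (fun b r => if PySem.List.pyGetD (PySem.List.pyGetD grid r []) c 0 > 0 then b + 1 else b) 0

-- loop body: best_blockers = float('inf') modelled as `none` (b < inf is always true)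
def pickA_step (grid : List (List Int)) (rows : Int) (s : Int × Option Int) (c : Int) : Int × Option Int :=
  let b := pickA_col grid rows c
  match s.2 with
  | none => (c, some b)
  | some bb => if b < bb then (c, some b) else s

def pick_greedy (grid : List (List Int)) (drop_power : Int) (rows : Int) (cols : Int) : Int :=
  ((PySem.List.pyRange 0 cols 1).foldl (pickA_step grid rows) (0, none)).1

-- ===== PORT B =====
-- counts[c] += 1 ported as set c.toNat (c comes from range(cols), hence 0 ≤ c: exact)
def pickB_counts (grid : List (List Int)) (rows : Int) (cols : Int) : List Int :=
  (PySem.List.pyRange 0 rows 1).foldl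
    (fun counts r =>
      let row := PySem.List.pyGetD grid r []
      (PySem.List.pyRange 0 cols 1).foldl
        (fun cnts c =>
          if PySem.List.pyGetD row c 0 > 0 then
            cnts.set c.toNat (PySem.List.pyGetD cnts c 0 + 1)
          else cnts)
        counts)
    (List.replicate cols.toNat 0)

def pickB_sel_step (counts : List Int) (s : Int × Int) (c : Int) : Int × Int :=
  if PySem.List.pyGetD counts c 0 < s.2 then (c, PySem.List.pyGetD counts c 0) else s

def pick_greedy_alt (grid : List (List Int)) (drop_power : Int) (rows : Int) (cols : Int) : Int :=
  if cols ≤ 0 then 0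
  else
    let counts := pickB_counts grid rows cols
    ((PySem.List.pyRange 1 cols 1).foldl (pickB_sel_step counts)
      (0, PySem.List.pyGetD counts 0 0)).1

-- ===== PRECONDITION & SPEC =====
-- Pre_ excludes exactly the inputs where Python A raises IndexError: rows > len(grid)
-- or some accessed row shorter than cols (only reachable when rows > 0 and cols > 0).
def Pre_pick_greedy (grid : List (List Int)) (drop_power : Int) (rows : Int) (cols : Int) : Prop :=
  cols ≤ 0 ∨ rows ≤ 0 ∨
    (rows ≤ (grid.length : Int) ∧ ∀ row ∈ grid.take rows.toNat, cols ≤ (row.length : Int))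
instance (grid : List (List Int)) (drop_power : Int) (rows : Int) (cols : Int) : Decidable (Pre_pick_greedy grid drop_power rows cols) := by unfold Pre_pick_greedy; infer_instance

def pvWitness_pick_greedy : List (List Int) × Int × Int × Int := ([[1, 0], [0, 2]], 3, 2, 2)

def Spec_pick_greedy (grid : List (List Int)) (drop_power : Int) (rows : Int) (cols : Int) (out : Int) : Prop := out = pick_greedy_alt grid drop_power rows cols
instance (grid : List (List Int)) (drop_power : Int) (rows : Int) (cols : Int) (out : Int) : Decidable (Spec_pick_greedy grid drop_power rows cols out) := by unfold Spec_pick_greedy; infer_instance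

-- ===== CLAIM (what is proved, stated in full; the proofs are below) =====
def Claim_equal_pick_greedy : Prop := ∀ (grid : List (List Int)) (drop_power : Int) (rows : Int) (cols : Int), Dom_pick_greedy grid drop_power rows cols → Pre_pick_greedy grid drop_power rows cols → Spec_pick_greedy grid drop_power rows cols (pick_greedy grid drop_power rows cols)

-- ===== LEMMAS AND PROOFS =====

-- inner per-row update fold: length is preserved
theorem pvInner_length (row : List Int) (L : List Int) (cnts : List Int) :
    (L.foldl (fun cnts c =>
        if PySem.List.pyGetD row c 0 > 0 then
          cnts.set c.toNat (PySem.List.pyGetD cnts c 0 + 1)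
        else cnts) cnts).length = cnts.length := by
  induction L generalizing cnts with
  | nil => rfl
  | cons c L ih =>
      simp only [List.foldl_cons]
      rw [ih]
      split <;> simp

-- inner per-row update fold: pointwise effect at a valid, nonnegative index
theorem pvInner_getD (row : List Int) (L : List Int) (cnts : List Int) (k : Int)
    (hk0 : 0 ≤ k) (hk : k.toNat < cnts.length)
    (hL : ∀ c ∈ L, 0 ≤ c) (hnd : L.Nodup) :
    PySem.List.pyGetD
      (L.foldl (fun cnts c =>
        if PySem.List.pyGetD row c 0 > 0 then
          cnts.set c.toNat (PySem.List.pyGetD cnts c 0 + 1)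
        else cnts) cnts) k 0
    = PySem.List.pyGetD cnts k 0 +
        (if k ∈ L ∧ PySem.List.pyGetD row k 0 > 0 then 1 else 0) := by
  induction L generalizing cnts with
  | nil => simp
  | cons c L ih =>
      have hc0 : 0 ≤ c := hL c (by simp)
      have hnd' : L.Nodup := hnd.of_cons
      have hcL : c ∉ L := by simpa using (List.nodup_cons.mp hnd).1
      simp only [List.foldl_cons]
      rw [ih _ (by split <;> simp [hk]) (fun x hx => hL x (by simp [hx])) hnd']
      by_cases hck : c = k
      · subst hck
        by_cases hrow : PySem.List.pyGetD row c 0 > 0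
        · have hset : PySem.List.pyGetD (cnts.set c.toNat (PySem.List.pyGetD cnts c 0 + 1)) c 0
              = PySem.List.pyGetD cnts c 0 + 1 := by
            rw [PySem.List.pyGetD_of_nonneg _ _ hc0, List.getD_eq_getElem?_getD,
                List.getElem?_set_self hk]
            simp
          simp [hrow, hcL, hset]
        · simp [hrow, hcL]
      · have hne : c.toNat ≠ k.toNat := by omega
        have hmem : (k ∈ c :: L ∧ PySem.List.pyGetD row k 0 > 0)
            ↔ (k ∈ L ∧ PySem.List.pyGetD row k 0 > 0) := by
          constructor
          · rintro ⟨hm, hr⟩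
            rcases List.mem_cons.mp hm with h | h
            · exact absurd h.symm hck
            · exact ⟨h, hr⟩
          · rintro ⟨hm, hr⟩; exact ⟨List.mem_cons_of_mem _ hm, hr⟩
        rw [if_congr hmem rfl rfl]
        congr 1
        split
        · rw [PySem.List.pyGetD_of_nonneg _ _ hk0, PySem.List.pyGetD_of_nonneg _ _ hk0,
              List.getD_eq_getElem?_getD, List.getD_eq_getElem?_getD,
              List.getElem?_set_ne hne]
        · rfl

-- outer fold: the count table at a valid column equals A's per-column sum started at any accumulator
theorem pvOuter_getD (grid : List (List Int)) (cols : Int) (L : List Int)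
    (init : List Int) (hlen : init.length = cols.toNat) (k : Int)
    (hk0 : 0 ≤ k) (hk : k < cols) :
    PySem.List.pyGetD
      (L.foldl (fun counts r =>
        let row := PySem.List.pyGetD grid r []
        (PySem.List.pyRange 0 cols 1).foldl
          (fun cnts c =>
            if PySem.List.pyGetD row c 0 > 0 then
              cnts.set c.toNat (PySem.List.pyGetD cnts c 0 + 1)
            else cnts) counts) init) k 0
    = L.foldl
        (fun b r => if PySem.List.pyGetD (PySem.List.pyGetD grid r []) k 0 > 0 then b + 1 else b)
        (PySem.List.pyGetD init k 0) := by
  induction L generalizing init with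
  | nil => rfl
  | cons r L ih =>
      simp only [List.foldl_cons]
      rw [ih _ (by rw [pvInner_length]; exact hlen)]
      congr 1
      rw [pvInner_getD _ _ _ _ hk0
            (by rw [hlen]; omega)
            (fun c hc => ((PySem.List.mem_pyRange_one).mp hc).1)
            (PySem.List.nodup_pyRange_one 0 cols)]
      have hkmem : k ∈ PySem.List.pyRange 0 cols 1 :=
        (PySem.List.mem_pyRange_one).mpr ⟨hk0, hk⟩
      by_cases hrow : PySem.List.pyGetD (PySem.List.pyGetD grid r []) k 0 > 0
      · simp [hkmem, hrow]
      · simp [hrow]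

-- the table agrees with A's per-column counter on every valid column
theorem pvCounts_getD (grid : List (List Int)) (rows cols : Int) (k : Int)
    (hk0 : 0 ≤ k) (hk : k < cols) :
    PySem.List.pyGetD (pickB_counts grid rows cols) k 0 = pickA_col grid rows k := by
  unfold pickB_counts pickA_col
  rw [pvOuter_getD grid cols _ _ (by simp) k hk0 hk]
  congr 1
  rw [PySem.List.pyGetD_of_nonneg _ _ hk0]
  simp only [List.getD_eq_getElem?_getD, List.getElem?_replicate]
  split <;> rfl

-- selection: A's fold from a `some` state tracks B's fold over the table exactly
theorem pvSel (grid : List (List Int)) (rows cols : Int) (counts : List Int)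
    (hct : ∀ c, 0 ≤ c → c < cols → PySem.List.pyGetD counts c 0 = pickA_col grid rows c)
    (L : List Int) (hL : ∀ c ∈ L, 0 ≤ c ∧ c < cols) :
    ∀ (best bb : Int),
      L.foldl (pickA_step grid rows) (best, some bb)
        = ((L.foldl (pickB_sel_step counts) (best, bb)).1,
           some (L.foldl (pickB_sel_step counts) (best, bb)).2) := by
  induction L with
  | nil => intro best bb; rfl
  | cons c L ih =>
      intro best bb
      have hc := hL c (by simp)
      have hL' : ∀ c ∈ L, 0 ≤ c ∧ c < cols := fun x hx => hL x (by simp [hx])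
      simp only [List.foldl_cons]
      have hcount : PySem.List.pyGetD counts c 0 = pickA_col grid rows c :=
        hct c hc.1 hc.2
      by_cases hlt : pickA_col grid rows c < bb
      · have : pickA_step grid rows (best, some bb) c = (c, some (pickA_col grid rows c)) := by
          simp [pickA_step, hlt]
        rw [this]
        have : pickB_sel_step counts (best, bb) c = (c, PySem.List.pyGetD counts c 0) := by
          simp [pickB_sel_step, hcount, hlt]
        rw [this, hcount]
        exact ih hL' c (pickA_col grid rows c)
      · have : pickA_step grid rows (best, some bb) c = (best, some bb) := by
          simp [pickA_step, hlt]
        rw [this]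
        have : pickB_sel_step counts (best, bb) c = (best, bb) := by
          simp [pickB_sel_step, hcount, hlt]
        rw [this]
        exact ih hL' best bb

-- ===== VERDICT (by name: the statement is the Claim_ definition above) =====
theorem pick_greedy_spec : Claim_equal_pick_greedy := by
  intro grid drop_power rows cols _hDom _hPre
  unfold Spec_pick_greedy pick_greedy pick_greedy_alt
  by_cases hc : cols ≤ 0
  · rw [PySem.List.pyRange_one_eq_nil (by omega), if_pos hc]
    rfl
  · rw [if_neg hc]
    have h0 : (0 : Int) < cols := by omega
    rw [PySem.List.pyRange_one_cons h0]
    simp only [List.foldl_cons]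
    have hstep : pickA_step grid rows (0, none) 0 = (0, some (pickA_col grid rows 0)) := rfl
    rw [hstep]
    simp only [zero_add]
    have hct := fun c hc0 hcc => pvCounts_getD grid rows cols c hc0 hcc
    rw [pvSel grid rows cols (pickB_counts grid rows cols) hct
          (PySem.List.pyRange 1 cols 1)
          (fun c hcmem => by
            have := (PySem.List.mem_pyRange_one).mp hcmem
            exact ⟨by omega, this.2⟩)
          0 (pickA_col grid rows 0)]
    rw [hct 0 le_rfl h0]
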